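-- pv_equiv track=rewrite | github.com/ShockJake/Python-University | Zestaw11/Zadanie_11_1.py | almostSortedIntegerNumbers
-- ===== SOURCE A (Python) =====
-- def almostSortedIntegerNumbers(number):  # podpuntk b
--     List = []
--     for i in range(number):
--         List.append(i)
--     for i in range(0, number, 2):
--         if i < number - 1:
--             element = List[i]
--             List[i] = List[i+1]
--             List[i+1] = element
--     return List
-- ===== SOURCE B (Python) =====
-- def almostSortedIntegerNumbers(number):
--     # one pass: each position computes its own value (odd i -> i-1, even i -> i+1 unless it's a lone tail)
--     return [i - 1 if i % 2 else (i + 1 if i + 1 < number else i) for i in range(number)]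
-- ===== Notes on version B (the rewrite author's own statement) =====
-- stated objective: simpler
-- what changed: A builds the identity list in one loop and then mutates it with a second loop of adjacent swaps; B emits each element directly from a per-index formula (odd i -> i-1, even i -> i+1 unless it is the unpaired last element) in a single comprehension.
import Mathlib
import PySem

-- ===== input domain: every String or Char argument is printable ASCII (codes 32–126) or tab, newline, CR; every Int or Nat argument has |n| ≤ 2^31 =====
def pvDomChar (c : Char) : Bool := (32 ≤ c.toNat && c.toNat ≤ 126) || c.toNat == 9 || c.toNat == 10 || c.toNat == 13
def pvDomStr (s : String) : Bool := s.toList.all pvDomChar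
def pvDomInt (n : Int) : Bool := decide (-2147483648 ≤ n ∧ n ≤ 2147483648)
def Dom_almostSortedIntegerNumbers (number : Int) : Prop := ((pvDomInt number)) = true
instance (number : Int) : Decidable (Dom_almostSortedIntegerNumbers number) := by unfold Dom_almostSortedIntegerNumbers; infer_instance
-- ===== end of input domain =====

-- B replaces A's build-then-swap two-loop mutation by a single per-index formula pass (same cost, simpler).
-- ===== PORT A =====
def almostSortedIntegerNumbers (number : Int) : List Int :=
  -- List = []; for i in range(number): List.append(i)
  let L := (PySem.List.pyRange 0 number 1).foldl (fun acc i => acc ++ [i]) []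
  -- for i in range(0, number, 2): if i < number - 1: swap List[i], List[i+1]
  (PySem.List.pyRange 0 number 2).foldl
    (fun L i =>
      if i < number - 1 then
        let element := PySem.List.pyGetD L i 0
        let L := PySem.List.pySetD L i (PySem.List.pyGetD L (i + 1) 0)
        let L := PySem.List.pySetD L (i + 1) element
        L
      else L) L

-- ===== PORT B =====
def almostSortedIntegerNumbers_alt (number : Int) : List Int :=
  (PySem.List.pyRange 0 number 1).map
    (fun i => if i % 2 ≠ 0 then i - 1 else if i + 1 < number then i + 1 else i)

-- ===== PRECONDITION & SPEC =====
def Spec_almostSortedIntegerNumbers (number : Int) (out : List Int) : Prop := out = almostSortedIntegerNumbers_alt number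
instance (number : Int) (out : List Int) : Decidable (Spec_almostSortedIntegerNumbers number out) := by unfold Spec_almostSortedIntegerNumbers; infer_instance

-- ===== CLAIM (what is proved, stated in full; the proofs are below) =====
def Claim_equal_almostSortedIntegerNumbers : Prop := ∀ (number : Int), Dom_almostSortedIntegerNumbers number → Spec_almostSortedIntegerNumbers number (almostSortedIntegerNumbers number)

-- ===== LEMMAS AND PROOFS =====

-- the fully-swapped prefix: pvSpine j = [1,0,3,2,…,2j-1,2j-2]
def pvSpine : Nat → List Int
  | 0 => []
  | j + 1 => pvSpine j ++ [2 * (j : Int) + 1, 2 * (j : Int)]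

theorem pvSpine_length (j : Nat) : (pvSpine j).length = 2 * j := by
  induction j with
  | zero => simp [pvSpine]
  | succ j ih => simp [pvSpine, ih]; omega

-- indexing/assignment into 'prefix ++ a :: b :: rest' at the prefix boundary
theorem pvGetFst (pre rest : List Int) (a b d i : Int) (hi : i = (pre.length : Int)) :
    PySem.List.pyGetD (pre ++ a :: b :: rest) i d = a := by
  subst hi; simp [PySem.List.pyGetD_natCast, List.getD]

theorem pvGetSnd (pre rest : List Int) (a b d i : Int) (hi : i = (pre.length : Int) + 1) :
    PySem.List.pyGetD (pre ++ a :: b :: rest) i d = b := by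
  have e : ((pre.length : Int) + 1) = ((pre.length + 1 : Nat) : Int) := by push_cast; ring
  rw [hi, e, PySem.List.pyGetD_natCast]; simp [List.getD]

theorem pvSetFst (pre rest : List Int) (a b v i : Int) (hi : i = (pre.length : Int)) :
    PySem.List.pySetD (pre ++ a :: b :: rest) i v = pre ++ v :: b :: rest := by
  subst hi; rw [PySem.List.pySetD_natCast]; simp

theorem pvSetSnd (pre rest : List Int) (a b v i : Int) (hi : i = (pre.length : Int) + 1) :
    PySem.List.pySetD (pre ++ a :: b :: rest) i v = pre ++ a :: v :: rest := by
  have e : ((pre.length : Int) + 1) = ((pre.length + 1 : Nat) : Int) := by push_cast; ring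
  rw [hi, e, PySem.List.pySetD_natCast]; simp

-- range(0, m, 2) is the doubled indices 0,2,…  (⌈m/2⌉ of them)
theorem pvRange2 (m : Nat) :
    PySem.List.pyRange 0 (m : Int) 2 =
      (List.range ((m + 1) / 2)).map (fun k : Nat => 2 * (k : Int)) := by
  rw [PySem.List.pyRange_of_pos _ _ (by norm_num)]
  have hc : (if (0 : Int) < (m : Int) then (((m : Int) - 0 + 2 - 1) / 2).toNat else 0)
      = (m + 1) / 2 := by split_ifs with h <;> omega
  rw [hc]
  exact List.map_congr_left (fun k _ => by ring)

-- B's formula over the paired prefix produces pvSpine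
theorem pvMapPairs (m : Int) : ∀ j : Nat, 2 * (j : Int) ≤ m →
    (PySem.List.pyRange 0 (2 * (j : Int)) 1).map
      (fun i => if i % 2 ≠ 0 then i - 1 else if i + 1 < m then i + 1 else i) = pvSpine j := by
  intro j
  induction j with
  | zero => intro _; simp [pvSpine, PySem.List.pyRange_one_eq_nil]
  | succ j ih =>
    intro h
    have hj : 2 * (j : Int) ≤ m := by push_cast at h; omega
    have e : (2 * ((j + 1 : Nat) : Int)) = (2 * (j : Int) + 1) + 1 := by push_cast; ring
    rw [e, PySem.List.pyRange_one_succ_right (by omega),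
      PySem.List.pyRange_one_succ_right (by omega),
      List.map_append, List.map_append, ih hj]
    have h3 : 2 * (j : Int) + 1 < m := by push_cast at h; omega
    simp only [List.map_cons, List.map_nil]
    rw [if_neg (by simp : ¬ ((2 * (j : Int)) % 2 ≠ 0)),
      if_pos ((by omega : (2 * (j : Int) + 1) % 2 ≠ 0)), if_pos h3]
    simp [pvSpine, List.append_assoc]

-- invariant of A's swap loop: after j steps the first 2·min j (m/2) slots are swapped
theorem pvFoldSwap (m : Nat) : ∀ j : Nat, j ≤ (m + 1) / 2 →
    ((List.range j).map (fun k : Nat => 2 * (k : Int))).foldl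
      (fun L i =>
        if i < (m : Int) - 1 then
          PySem.List.pySetD (PySem.List.pySetD L i (PySem.List.pyGetD L (i + 1) 0)) (i + 1)
            (PySem.List.pyGetD L i 0)
        else L)
      (PySem.List.pyRange 0 (m : Int) 1)
    = pvSpine (min j (m / 2)) ++
        PySem.List.pyRange ((2 * min j (m / 2) : Nat) : Int) (m : Int) 1 := by
  intro j
  induction j with
  | zero => intro _; simp [pvSpine]
  | succ j ih =>
    intro h
    rw [List.range_succ, List.map_append, List.foldl_append, ih (by omega)]
    simp only [List.map_cons, List.map_nil, List.foldl_cons, List.foldl_nil]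
    by_cases hj : j < m / 2
    · have hmin : min j (m / 2) = j := by omega
      have hmin' : min (j + 1) (m / 2) = j + 1 := by omega
      have ecast : ((2 * j : Nat) : Int) = 2 * (j : Int) := by push_cast; ring
      have hsuf : PySem.List.pyRange ((2 * j : Nat) : Int) (m : Int) 1
          = (2 * (j : Int)) :: (2 * (j : Int) + 1) ::
              PySem.List.pyRange (2 * (j : Int) + 1 + 1) (m : Int) 1 := by
        rw [ecast,
          PySem.List.pyRange_one_cons (by omega),
          PySem.List.pyRange_one_cons (by omega)]
      rw [hmin, hsuf]
      have hplen : (2 * (j : Int)) = ((pvSpine j).length : Int) := by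
        rw [pvSpine_length]; push_cast; ring
      rw [if_pos (by omega : 2 * (j : Int) < (m : Int) - 1)]
      rw [pvGetFst _ _ _ _ _ _ hplen, pvGetSnd _ _ _ _ _ _ (by omega),
        pvSetFst _ _ _ _ _ _ hplen, pvSetSnd _ _ _ _ _ _ (by omega)]
      rw [hmin']
      have etail : ((2 * (j + 1) : Nat) : Int) = 2 * (j : Int) + 1 + 1 := by push_cast; ring
      rw [etail]
      simp [pvSpine, List.append_assoc]
    · -- j = m/2 and m is odd: the guard i < m-1 fails, nothing changes
      have hguard : ¬ ((2 * min j (m / 2) : Nat) : Int) < (m : Int) - 1 := by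
        push_cast; omega
      have hmin : min (j + 1) (m / 2) = min j (m / 2) := by omega
      have ecast : ((2 * j : Nat) : Int) = 2 * (j : Int) := by push_cast; ring
      rw [show (2 * (j : Int)) = ((2 * j : Nat) : Int) from ecast.symm]
      rw [if_neg (by push_cast at hguard ⊢; omega), hmin]

-- B's tail: the unpaired last element (if any) is a fixed point of the formula
theorem pvMapTail (m : Nat) :
    (PySem.List.pyRange ((2 * (m / 2) : Nat) : Int) (m : Int) 1).map
      (fun i => if i % 2 ≠ 0 then i - 1 else if i + 1 < (m : Int) then i + 1 else i)
    = PySem.List.pyRange ((2 * (m / 2) : Nat) : Int) (m : Int) 1 := by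
  by_cases he : m % 2 = 0
  · rw [PySem.List.pyRange_one_eq_nil (by push_cast; omega)]; simp
  · have e : (m : Int) = ((2 * (m / 2) : Nat) : Int) + 1 := by push_cast; omega
    rw [e, PySem.List.pyRange_one_singleton]
    simp only [List.map_cons, List.map_nil]
    rw [if_neg (by push_cast; simp : ¬ (((2 * (m / 2) : Nat) : Int) % 2 ≠ 0)),
      if_neg (by omega : ¬ (((2 * (m / 2) : Nat) : Int) + 1 < ((2 * (m / 2) : Nat) : Int) + 1))]

-- ===== VERDICT (by name: the statement is the Claim_ definition above) =====
theorem almostSortedIntegerNumbers_spec : Claim_equal_almostSortedIntegerNumbers := by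
  intro number _
  unfold Spec_almostSortedIntegerNumbers
  by_cases hn : number ≤ 0
  · have h1 : PySem.List.pyRange 0 number 1 = [] := PySem.List.pyRange_one_eq_nil hn
    have h2 : PySem.List.pyRange 0 number 2 = [] := by
      rw [PySem.List.pyRange_of_pos _ _ (by norm_num), if_neg (by omega)]
      simp
    simp [almostSortedIntegerNumbers, almostSortedIntegerNumbers_alt, h1, h2]
  · obtain ⟨m, hm⟩ : ∃ m : Nat, number = (m : Int) := ⟨number.toNat, by omega⟩
    subst hm
    have hA : almostSortedIntegerNumbers (m : Int)
        = pvSpine (m / 2) ++ PySem.List.pyRange ((2 * (m / 2) : Nat) : Int) (m : Int) 1 := by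
      simp only [almostSortedIntegerNumbers]
      rw [PySem.List.foldl_append_singleton, List.nil_append, pvRange2]
      have hstep := pvFoldSwap m ((m + 1) / 2) le_rfl
      have hmin : min ((m + 1) / 2) (m / 2) = m / 2 := by omega
      rw [hmin] at hstep
      exact hstep
    have hB : almostSortedIntegerNumbers_alt (m : Int)
        = pvSpine (m / 2) ++ PySem.List.pyRange ((2 * (m / 2) : Nat) : Int) (m : Int) 1 := by
      simp only [almostSortedIntegerNumbers_alt]
      rw [PySem.List.pyRange_one_append 0 ((2 * (m / 2) : Nat) : Int) (m : Int)
        (by push_cast; omega) (by push_cast; omega), List.map_append]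
      have hpref : ((2 * (m / 2) : Nat) : Int) = 2 * ((m / 2 : Nat) : Int) := by push_cast; ring
      rw [hpref, pvMapPairs (m : Int) (m / 2) (by push_cast; omega), ← hpref, pvMapTail]
    rw [hA, hB]
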